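-- pv_equiv track=rewrite | github.com/pycalphad/pycalphad | pycalphad/mapping/primitives.py | _get_phase_list_with_multiplicity
-- ===== SOURCE A (Python) =====
-- def _get_phase_list_with_multiplicity(phases: list[str]):
--     """
--     Helper function to get unique list of phases
--     If a miscibility gap is present in the phase list, this will add a #n to the phase name
--     """
--     u_phases = []
--     for p in phases:
--         test_name = p
--         phase_id = 2
--         while test_name in u_phases:
--             test_name = f'{p}#{phase_id}'
--             phase_id += 1
--         u_phases.append(test_name)
--     return u_phases
-- ===== SOURCE B (Python) =====
-- def _get_phase_list_with_multiplicity(phases: list[str]):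
--     """
--     Helper function to get unique list of phases
--     If a miscibility gap is present in the phase list, this will add a #n to the phase name
--     """
--     u_phases = []
--     used = set()
--     next_id = {}
--     for p in phases:
--         if p not in used:
--             name = p
--         else:
--             phase_id = next_id.get(p, 2)
--             name = f'{p}#{phase_id}'
--             while name in used:
--                 phase_id += 1
--                 name = f'{p}#{phase_id}'
--             next_id[p] = phase_id + 1
--         used.add(name)
--         u_phases.append(name)
--     return u_phases
-- ===== Notes on version B (the rewrite author's own statement) =====
-- stated objective: faster
-- what changed: Replaces the quadratic list-membership rescans with an O(1) set of used names plus a per-base next-id cache, so each occurrence of a base name resumes the suffix search where the previous one stopped instead of re-testing #2,#3,... against a growing list.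
import Mathlib
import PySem

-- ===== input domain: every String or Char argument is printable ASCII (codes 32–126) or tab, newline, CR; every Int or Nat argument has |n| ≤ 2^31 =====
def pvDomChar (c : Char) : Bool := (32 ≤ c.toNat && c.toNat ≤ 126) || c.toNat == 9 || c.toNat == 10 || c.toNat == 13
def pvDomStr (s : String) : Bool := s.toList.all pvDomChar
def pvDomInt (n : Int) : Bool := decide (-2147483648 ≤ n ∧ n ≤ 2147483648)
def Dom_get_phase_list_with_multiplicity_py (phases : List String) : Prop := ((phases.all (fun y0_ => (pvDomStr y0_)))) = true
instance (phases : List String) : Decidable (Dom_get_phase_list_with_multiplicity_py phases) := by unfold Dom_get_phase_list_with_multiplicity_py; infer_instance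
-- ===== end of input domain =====

-- B replaces A's quadratic list rescans with a set of used names plus a per-base next-id cache (objective: faster; return value only, no mutation).

-- f'{p}#{phase_id}' (the same f-string appears in both sources)
def pvC (p : String) (i : Int) : String := p ++ "#" ++ PySem.Int.toStr i

-- ===== PORT A =====
-- 'while test_name in u_phases: test_name = f"{p}#{phase_id}"; phase_id += 1'
-- The fuel u.length+1 suffices: the candidates are pairwise distinct, so one of the
-- first u.length+1 of them is not in u (pvLoopA_main / pvCount below).
def pvLoopA (p : String) (u : List String) : Nat → Int → String → String
  | 0, _, cur => cur
  | f + 1, id, cur => if cur ∈ u then pvLoopA p u f (id + 1) (pvC p id) else cur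

def get_phase_list_with_multiplicity_py (phases : List String) : List String :=
  phases.foldl (fun u p => u ++ [pvLoopA p u (u.length + 1) 2 p]) []

-- ===== PORT B =====
-- 'while name in used: phase_id += 1; name = f"{p}#{phase_id}"'; fuel used.length+1 (pvFree below)
def pvLoopB (p : String) (used : PySem.Set String) : Nat → Int → String → Int × String
  | 0, id, name => (id, name)
  | f + 1, id, name =>
      if used.contains name then pvLoopB p used f (id + 1) (pvC p (id + 1)) else (id, name)

def pvStepB (st : List String × PySem.Set String × PySem.Dict String Int) (p : String) :
    List String × PySem.Set String × PySem.Dict String Int :=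
  let (u, used, cache) := st
  let (name, cache') :=
    if used.contains p = false then (p, cache)
    else
      let k0 := cache.getD p 2
      let (k, nm) := pvLoopB p used (used.length + 1) k0 (pvC p k0)
      (nm, cache.insert p (k + 1))
  (u ++ [name], used.add name, cache')

def get_phase_list_with_multiplicity_py_alt (phases : List String) : List String :=
  (phases.foldl pvStepB ([], PySem.Set.empty, PySem.Dict.empty)).1

-- ===== PRECONDITION & SPEC =====
def Spec_get_phase_list_with_multiplicity_py (phases : List String) (out : List String) : Prop := out = get_phase_list_with_multiplicity_py_alt phases
instance (phases : List String) (out : List String) : Decidable (Spec_get_phase_list_with_multiplicity_py phases out) := by unfold Spec_get_phase_list_with_multiplicity_py; infer_instance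

-- ===== CLAIM (what is proved, stated in full; the proofs are below) =====
def Claim_equal_get_phase_list_with_multiplicity_py : Prop := ∀ (phases : List String), Dom_get_phase_list_with_multiplicity_py phases → Spec_get_phase_list_with_multiplicity_py phases (get_phase_list_with_multiplicity_py phases)

-- ===== LEMMAS AND PROOFS =====

theorem pvTdcAcc (f : Nat) : ∀ (n : Nat) (ds : List Char),
    Nat.toDigitsCore 10 f n ds = Nat.toDigitsCore 10 f n [] ++ ds := by
  induction f with
  | zero => intro n ds; simp [Nat.toDigitsCore]
  | succ f ih =>
    intro n ds
    simp only [Nat.toDigitsCore]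
    by_cases h : n / 10 = 0
    · simp [h]
    · simp only [h, if_false]
      rw [ih (n / 10) ((n % 10).digitChar :: ds), ih (n / 10) [(n % 10).digitChar]]
      simp

theorem pvTdcFuel (f : Nat) : ∀ (f' n : Nat), n < f → n < f' →
    Nat.toDigitsCore 10 f n [] = Nat.toDigitsCore 10 f' n [] := by
  induction f with
  | zero => intro f' n h; omega
  | succ f ih =>
    intro f' n h h'
    cases f' with
    | zero => omega
    | succ f' =>
      simp only [Nat.toDigitsCore]
      by_cases h0 : n / 10 = 0
      · simp [h0]
      · simp only [h0, if_false]
        rw [pvTdcAcc f, pvTdcAcc f']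
        have hn : 10 ≤ n := by
          rcases Nat.lt_or_ge n 10 with h10 | h10
          · exact absurd (Nat.div_eq_of_lt h10) h0
          · exact h10
        have : n / 10 < n := Nat.div_lt_self (by omega) (by omega)
        rw [ih f' (n / 10) (by omega) (by omega)]

theorem pvRepLt {n : Nat} (h : n < 10) : Nat.toDigits 10 n = [Nat.digitChar n] := by
  simp [Nat.toDigits, Nat.toDigitsCore, Nat.div_eq_of_lt h, Nat.mod_eq_of_lt h]

theorem pvRepGe {n : Nat} (h : 10 ≤ n) :
    Nat.toDigits 10 n = Nat.toDigits 10 (n / 10) ++ [Nat.digitChar (n % 10)] := by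
  have h0 : n / 10 ≠ 0 := by
    intro hc; have := Nat.div_add_mod n 10; omega
  have hlt : n / 10 < n := Nat.div_lt_self (by omega) (by omega)
  show Nat.toDigitsCore 10 (n+1) n [] = _
  simp only [Nat.toDigitsCore, h0, if_false]
  rw [pvTdcAcc, pvTdcFuel n (n / 10 + 1) (n / 10) (by omega) (by omega)]
  rfl

theorem pvRepNeNil (n : Nat) : Nat.toDigits 10 n ≠ [] := by
  rcases Nat.lt_or_ge n 10 with h | h
  · rw [pvRepLt h]; simp
  · rw [pvRepGe h]; simp

theorem pvDcInj {a b : Nat} (ha : a < 10) (hb : b < 10) (h : Nat.digitChar a = Nat.digitChar b) :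
    a = b := by
  interval_cases a <;> interval_cases b <;> simp_all [Nat.digitChar]

theorem pvRepInj : ∀ (n m : Nat), Nat.toDigits 10 n = Nat.toDigits 10 m → n = m := by
  intro n
  induction n using Nat.strong_induction_on with
  | _ n ih =>
    intro m h
    rcases Nat.lt_or_ge n 10 with hn | hn <;> rcases Nat.lt_or_ge m 10 with hm | hm
    · rw [pvRepLt hn, pvRepLt hm] at h
      exact pvDcInj hn hm (List.singleton_injective h)
    · rw [pvRepLt hn, pvRepGe hm] at h
      have hlen := congrArg List.length h
      simp only [List.length_append, List.length_cons, List.length_nil] at hlen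
      exact absurd (List.eq_nil_of_length_eq_zero (by omega)) (pvRepNeNil (m / 10))
    · rw [pvRepGe hn, pvRepLt hm] at h
      have hlen := congrArg List.length h
      simp only [List.length_append, List.length_cons, List.length_nil] at hlen
      exact absurd (List.eq_nil_of_length_eq_zero (by omega)) (pvRepNeNil (n / 10))
    · rw [pvRepGe hn, pvRepGe hm] at h
      have h2 := List.append_inj' h rfl
      have hdiv := ih (n / 10) (Nat.div_lt_self (by omega) (by omega)) (m / 10) h2.1
      have hmod := pvDcInj (Nat.mod_lt n (by omega)) (Nat.mod_lt m (by omega))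
        (List.singleton_injective h2.2)
      omega


theorem pvToCharsInj {i j : Int} (hi : 0 ≤ i) (hj : 0 ≤ j)
    (h : PySem.Int.toChars i = PySem.Int.toChars j) : i = j := by
  unfold PySem.Int.toChars at h
  rw [if_neg (by omega), if_neg (by omega)] at h
  have := pvRepInj _ _ h
  omega

theorem pvC_toList (p : String) (i : Int) :
    (pvC p i).toList = p.toList ++ '#' :: (PySem.Int.toChars i) := by
  unfold pvC
  rw [String.toList_append, String.toList_append, ← PySem.Int.toList_toStr]
  simp

theorem pvC_ne_base (p : String) (i : Int) : pvC p i ≠ p := by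
  intro h
  have := congrArg (fun s => s.toList.length) h
  simp [pvC_toList] at this

theorem pvC_inj {p : String} {i j : Int} (hi : 0 ≤ i) (hj : 0 ≤ j) (h : pvC p i = pvC p j) :
    i = j := by
  have h2 := congrArg String.toList h
  rw [pvC_toList, pvC_toList] at h2
  exact pvToCharsInj hi hj (by simpa using h2)

theorem pvCount {g : Nat → String} {u : List String} (hg : Function.Injective g) (m : Nat)
    (h : ∀ i < m, g i ∈ u) : m ≤ u.length := by
  have hsub : (Finset.range m).image g ⊆ u.toFinset := by
    intro x hx
    simp only [Finset.mem_image, Finset.mem_range] at hx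
    obtain ⟨i, hi, rfl⟩ := hx
    exact List.mem_toFinset.2 (h i hi)
  calc m = ((Finset.range m).image g).card := by
            rw [Finset.card_image_of_injective _ hg, Finset.card_range]
    _ ≤ u.toFinset.card := Finset.card_le_card hsub
    _ ≤ u.length := List.toFinset_card_le u

theorem pvFree (u : List String) (g : Nat → String) (hg : Function.Injective g) :
    ∃ i, i ≤ u.length ∧ g i ∉ u := by
  by_contra hc
  push Not at hc
  have := pvCount hg (u.length + 1) (fun i hi => hc i (by omega))
  omega


theorem pvLoopA_exit {p : String} {u : List String} (f : Nat) (id : Int) {cur : String}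
    (h : cur ∉ u) : pvLoopA p u f id cur = cur := by
  cases f with
  | zero => rfl
  | succ f => simp [pvLoopA, h]

theorem pvLoopA_go {p : String} {u : List String} {kstar : Int}
    (hout : pvC p kstar ∉ u) :
    ∀ (f : Nat) (id : Int) (cur : String), cur ∈ u → id ≤ kstar →
      (∀ j : Int, id ≤ j → j < kstar → pvC p j ∈ u) →
      kstar - id + 1 ≤ (f : Int) →
      pvLoopA p u f id cur = pvC p kstar := by
  intro f
  induction f with
  | zero => intro id cur _ _ _ hf; simp at hf; omega
  | succ f ih =>
    intro id cur hcur hid hin hf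
    simp only [pvLoopA, hcur, if_true]
    by_cases heq : id = kstar
    · subst heq
      exact pvLoopA_exit f (id + 1) hout
    · exact ih (id + 1) (pvC p id) (hin id le_rfl (by omega)) (by omega)
        (fun j hj hj' => hin j (by omega) hj') (by push_cast at hf ⊢; omega)

theorem pvLoopA_main {p : String} {u : List String} {kstar : Int}
    (hp : p ∈ u) (hk : 2 ≤ kstar)
    (hin : ∀ j : Int, 2 ≤ j → j < kstar → pvC p j ∈ u)
    (hout : pvC p kstar ∉ u) :
    pvLoopA p u (u.length + 1) 2 p = pvC p kstar := by
  -- bound kstar via counting: p, pvC p 2, …, pvC p (kstar-1) are distinct elements of u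
  have hginj : Function.Injective (fun i : Nat => match i with
      | 0 => p
      | Nat.succ i => pvC p ((i : Int) + 2)) := by
    intro a b hab
    match a, b with
    | 0, 0 => rfl
    | 0, Nat.succ b => exact absurd hab.symm (pvC_ne_base p _)
    | Nat.succ a, 0 => exact absurd hab (pvC_ne_base p _)
    | Nat.succ a, Nat.succ b =>
      have := pvC_inj (by positivity) (by positivity) hab
      omega
  have hbound : (kstar - 1).toNat ≤ u.length := by
    apply pvCount hginj
    intro i hi
    match i with
    | 0 => exact hp
    | Nat.succ i => exact hin _ (by omega) (by omega)
  have hkb : kstar ≤ (u.length : Int) + 1 := by omega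
  -- unfold the first iteration: cur = p ∈ u
  show pvLoopA p u (u.length + 1) 2 p = pvC p kstar
  have : pvLoopA p u (u.length + 1) 2 p = pvLoopA p u u.length 3 (pvC p 2) := by
    simp [pvLoopA, hp]
  rw [this]
  by_cases heq : kstar = 2
  · subst heq; exact pvLoopA_exit _ _ hout
  · exact pvLoopA_go hout u.length 3 (pvC p 2) (hin 2 le_rfl (by omega)) (by omega)
      (fun j hj hj' => hin j (by omega) hj') (by omega)

theorem pvLoopB_go {p : String} {u : List String} :
    ∀ (f : Nat) (k : Int), 2 ≤ k → (∃ m : Nat, m ≤ f ∧ pvC p (k + m) ∉ u) →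
      ∃ kstar : Int, k ≤ kstar ∧ pvC p kstar ∉ u ∧
        (∀ j : Int, k ≤ j → j < kstar → pvC p j ∈ u) ∧
        pvLoopB p u f k (pvC p k) = (kstar, pvC p kstar) := by
  intro f
  induction f with
  | zero =>
    intro k hk hex
    obtain ⟨m, hm, hout⟩ := hex
    interval_cases m
    refine ⟨k, le_rfl, by simpa using hout, by omega, rfl⟩
  | succ f ih =>
    intro k hk hex
    by_cases hmem : pvC p k ∈ u
    · obtain ⟨m, hm, hout⟩ := hex
      have hm0 : m ≠ 0 := by rintro rfl; simp at hout; exact hout hmem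
      obtain ⟨kstar, h1, h2, h3, h4⟩ := ih (k + 1) (by omega)
        ⟨m - 1, by omega, by have : k + 1 + ((m - 1 : Nat) : Int) = k + m := by omega
                             rw [this]; exact hout⟩
      refine ⟨kstar, by omega, h2, ?_, ?_⟩
      · intro j hj hj'
        by_cases hjk : j = k
        · subst hjk; exact hmem
        · exact h3 j (by omega) hj'
      · simp only [pvLoopB, PySem.Set.contains]
        rw [if_pos (by simpa [List.contains_eq_mem] using hmem)]
        exact h4
    · refine ⟨k, le_rfl, hmem, by omega, ?_⟩
      simp only [pvLoopB, PySem.Set.contains]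
      rw [if_neg (by simpa [List.contains_eq_mem] using hmem)]


theorem pvStepB_def (u : List String) (used : PySem.Set String) (cache : PySem.Dict String Int)
    (p : String) : pvStepB (u, used, cache) p =
    (let nc := if used.contains p = false then (p, cache)
               else (let k0 := cache.getD p 2;
                     let r := pvLoopB p used (used.length + 1) k0 (pvC p k0);
                     (r.2, cache.insert p (r.1 + 1)));
     (u ++ [nc.1], used.add nc.1, nc.2)) := by
  unfold pvStepB
  cases hr : pvLoopB p used (used.length + 1) (cache.getD p 2) (pvC p (cache.getD p 2)) with
  | mk k nm => by_cases hc : used.contains p = false <;> simp [hr]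

def pvInv (u : List String) (cache : PySem.Dict String Int) : Prop :=
  u.Nodup ∧ ∀ p k, cache.get? p = some k →
    2 ≤ k ∧ p ∈ u ∧ ∀ j : Int, 2 ≤ j → j < k → pvC p j ∈ u

theorem pvStep_eq {u : List String} {cache : PySem.Dict String Int} (p : String)
    (h : pvInv u cache) :
    ∃ cache', pvStepB (u, u, cache) p
        = (u ++ [pvLoopA p u (u.length + 1) 2 p], u ++ [pvLoopA p u (u.length + 1) 2 p], cache')
      ∧ pvInv (u ++ [pvLoopA p u (u.length + 1) 2 p]) cache' := by
  obtain ⟨hnd, hcache⟩ := h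
  by_cases hmem : p ∈ u
  · -- duplicate branch
    -- the cache gives: the start index k0 is ≥ 2 and every suffix below k0 is already used
    set k0 := cache.getD p 2 with hk0def
    have hk0 : 2 ≤ k0 ∧ ∀ j : Int, 2 ≤ j → j < k0 → pvC p j ∈ u := by
      rw [hk0def]
      unfold PySem.Dict.getD
      cases hg : cache.get? p with
      | none => simp; omega
      | some k => obtain ⟨h1, _, h3⟩ := hcache p k hg; simpa using ⟨h1, h3⟩
    -- a free suffix exists within the fuel
    have hfree : ∃ m : Nat, m ≤ u.length + 1 ∧ pvC p (k0 + m) ∉ u := by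
      obtain ⟨i, hi, hout⟩ := pvFree u (fun m : Nat => pvC p (k0 + m))
        (fun a b hab => by have := pvC_inj (by omega) (by omega) hab; omega)
      exact ⟨i, by omega, hout⟩
    obtain ⟨kstar, hk1, hk2, hk3, hk4⟩ := pvLoopB_go (u.length + 1) k0 hk0.1 hfree
    have hA : pvLoopA p u (u.length + 1) 2 p = pvC p kstar := by
      apply pvLoopA_main hmem (by omega) _ hk2
      intro j hj hj'
      by_cases hjk : j < k0
      · exact hk0.2 j hj hjk
      · exact hk3 j (by omega) hj'
    refine ⟨cache.insert p (kstar + 1), ?_, ?_, ?_⟩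
    · rw [pvStepB_def, if_neg (by simp [PySem.Set.contains, List.contains_eq_mem, hmem])]
      simp only [← hk0def, hk4, hA, PySem.Set.add]
      rw [if_neg (by simp [PySem.Set.contains, List.contains_eq_mem, hk2])]
    · simp [hA, List.nodup_append, hnd]
      exact fun a ha h => hk2 (h ▸ ha)
    · intro q k hq
      by_cases hqp : q = p
      · subst hqp
        rw [PySem.Dict.get?_insert_self] at hq
        injection hq with hq
        subst hq
        refine ⟨by omega, by simp [hmem], ?_⟩
        intro j hj hj'
        by_cases hjk : j = kstar
        · subst hjk; simp [hA]
        · by_cases hjk0 : j < k0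
          · simp [hk0.2 j hj hjk0]
          · simp [hk3 j (by omega) (by omega)]
      · rw [PySem.Dict.get?_insert_of_ne _ _ hqp] at hq
        obtain ⟨h1, h2, h3⟩ := hcache q k hq
        exact ⟨h1, by simp [h2], fun j hj hj' => by simp [h3 j hj hj']⟩
  · -- fresh name branch
    have hA : pvLoopA p u (u.length + 1) 2 p = p := pvLoopA_exit _ _ hmem
    refine ⟨cache, ?_, ?_, ?_⟩
    · rw [pvStepB_def, if_pos (by simp [PySem.Set.contains, List.contains_eq_mem, hmem])]
      simp only [hA, PySem.Set.add]
      rw [if_neg (by simp [PySem.Set.contains, List.contains_eq_mem, hmem])]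
    · simp [hA, List.nodup_append, hnd]
      exact fun a ha h => hmem (h ▸ ha)
    · intro q k hq
      obtain ⟨h1, h2, h3⟩ := hcache q k hq
      exact ⟨h1, by simp [h2], fun j hj hj' => by simp [h3 j hj hj']⟩

theorem pvMain : ∀ (phases : List String) (u : List String) (cache : PySem.Dict String Int),
    pvInv u cache →
    phases.foldl (fun u p => u ++ [pvLoopA p u (u.length + 1) 2 p]) u =
      (phases.foldl pvStepB (u, u, cache)).1 := by
  intro phases
  induction phases with
  | nil => intro u cache _; rfl
  | cons p ps ih =>
    intro u cache h
    obtain ⟨cache', heq, hinv⟩ := pvStep_eq p h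
    simp only [List.foldl_cons, heq]
    exact ih _ _ hinv

-- ===== VERDICT (by name: the statement is the Claim_ definition above) =====
theorem get_phase_list_with_multiplicity_py_spec : Claim_equal_get_phase_list_with_multiplicity_py := by
  intro phases _
  unfold Spec_get_phase_list_with_multiplicity_py get_phase_list_with_multiplicity_py get_phase_list_with_multiplicity_py_alt
  exact pvMain phases [] PySem.Dict.empty ⟨List.nodup_nil, by intro p k h; simp [PySem.Dict.get?, PySem.Dict.empty] at h⟩
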